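-- pv_equiv track=rewrite | github.com/HackForHumanity2026/Sibyl | backend/app/agents/news_media_agent.py | _assign_tier_by_domain
-- ===== SOURCE A (Python) =====
-- TIER_1_DOMAINS = [
--     "propublica.org",
--     "reuters.com/investigates",
--     "sec.gov",
--     "justice.gov",
--     "courtlistener.com",
--     "pacer.gov",
--     "ftc.gov",
--     "epa.gov/enforcement",
-- ]
--
-- TIER_2_DOMAINS = [
--     "nytimes.com",
--     "wsj.com",
--     "washingtonpost.com",
--     "bloomberg.com",
--     "ft.com",
--     "bbc.com",
--     "bbc.co.uk",
--     "reuters.com",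
--     "apnews.com",
--     "theguardian.com",
--     "economist.com",
--     "epa.gov",
--     "energy.gov",
--     "iea.org",
--     "wri.org",
--     "cdp.net",
--     "spglobal.com",
-- ]
--
-- TIER_3_DOMAINS = [
--     "prnewswire.com",
--     "businesswire.com",
--     "globenewswire.com",
--     "accesswire.com",
--     "seekingalpha.com",
--     "fool.com",
--     "investopedia.com",
-- ]
--
-- SOCIAL_MEDIA_DOMAINS = [
--     "twitter.com",
--     "x.com",
--     "facebook.com",
--     "linkedin.com",
--     "reddit.com",
--     "instagram.com",
--     "tiktok.com",
-- ]
--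
-- def _assign_tier_by_domain(source_domain: str) -> int | None:
--     """Assign credibility tier based on domain matching.
--
--     Returns tier 1-4, or None if domain not recognized.
--     """
--     domain_lower = source_domain.lower()
--
--     # Check Tier 1
--     for tier1_domain in TIER_1_DOMAINS:
--         if tier1_domain in domain_lower:
--             return 1
--
--     # Check Tier 2
--     for tier2_domain in TIER_2_DOMAINS:
--         if tier2_domain in domain_lower:
--             return 2
--
--     # Check Tier 3
--     for tier3_domain in TIER_3_DOMAINS:
--         if tier3_domain in domain_lower:
--             return 3
--
--     # Check social media (Tier 4)
--     for social_domain in SOCIAL_MEDIA_DOMAINS: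
--         if social_domain in domain_lower:
--             return 4
--
--     return None  # Unknown domain
-- ===== SOURCE B (Python) =====
-- TIER_1_DOMAINS = [
--     "propublica.org",
--     "reuters.com/investigates",
--     "sec.gov",
--     "justice.gov",
--     "courtlistener.com",
--     "pacer.gov",
--     "ftc.gov",
--     "epa.gov/enforcement",
-- ]
--
-- TIER_2_DOMAINS = [
--     "nytimes.com",
--     "wsj.com",
--     "washingtonpost.com",
--     "bloomberg.com",
--     "ft.com",
--     "bbc.com",
--     "bbc.co.uk",
--     "reuters.com",
--     "apnews.com",
--     "theguardian.com",
--     "economist.com",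
--     "epa.gov",
--     "energy.gov",
--     "iea.org",
--     "wri.org",
--     "cdp.net",
--     "spglobal.com",
-- ]
--
-- TIER_3_DOMAINS = [
--     "prnewswire.com",
--     "businesswire.com",
--     "globenewswire.com",
--     "accesswire.com",
--     "seekingalpha.com",
--     "fool.com",
--     "investopedia.com",
-- ]
--
-- SOCIAL_MEDIA_DOMAINS = [
--     "twitter.com",
--     "x.com",
--     "facebook.com",
--     "linkedin.com",
--     "reddit.com",
--     "instagram.com",
--     "tiktok.com",
-- ]
--
-- _TIERED = [
--     (1, TIER_1_DOMAINS),
--     (2, TIER_2_DOMAINS),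
--     (3, TIER_3_DOMAINS),
--     (4, SOCIAL_MEDIA_DOMAINS),
-- ]
--
--
-- def _assign_tier_by_domain(source_domain: str) -> int | None:
--     """Exhaustive scan: collect every matching tier, return the best (lowest).
--
--     Correct because all entries of one list carry the same tier, so the
--     first match in A's priority order is exactly the numerically smallest
--     matching tier.
--     """
--     domain_lower = source_domain.lower()
--     hits = [tier for tier, subs in _TIERED for sub in subs if sub in domain_lower]
--     return min(hits) if hits else None
-- ===== Notes on version B (the rewrite author's own statement) =====
-- stated objective: alternative
-- what changed: A does four priority loops with early returns; B instead exhaustively collects every matching tier across all lists and returns the minimum (or None), with no early return and no reliance on scan order.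
import Mathlib
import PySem

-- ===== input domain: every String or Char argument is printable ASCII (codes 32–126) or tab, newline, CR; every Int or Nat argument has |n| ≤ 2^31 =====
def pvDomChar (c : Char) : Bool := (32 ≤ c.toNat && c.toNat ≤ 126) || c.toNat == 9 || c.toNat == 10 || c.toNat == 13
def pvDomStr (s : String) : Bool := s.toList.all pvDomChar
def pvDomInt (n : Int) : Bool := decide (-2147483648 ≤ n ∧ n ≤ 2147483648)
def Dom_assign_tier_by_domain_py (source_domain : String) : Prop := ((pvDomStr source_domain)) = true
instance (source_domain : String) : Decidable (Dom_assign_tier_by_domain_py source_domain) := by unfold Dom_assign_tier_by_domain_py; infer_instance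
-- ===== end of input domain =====

-- B changes: instead of A's four early-return priority loops, B exhaustively collects
-- EVERY matching tier and returns the minimum (or none) — an aggregate scan with no
-- early return (alternative decomposition; same cost).

-- ===== PORT A =====
def TIER_1_DOMAINS : List String :=
  ["propublica.org", "reuters.com/investigates", "sec.gov", "justice.gov",
   "courtlistener.com", "pacer.gov", "ftc.gov", "epa.gov/enforcement"]

def TIER_2_DOMAINS : List String :=
  ["nytimes.com", "wsj.com", "washingtonpost.com", "bloomberg.com", "ft.com",
   "bbc.com", "bbc.co.uk", "reuters.com", "apnews.com", "theguardian.com",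
   "economist.com", "epa.gov", "energy.gov", "iea.org", "wri.org", "cdp.net",
   "spglobal.com"]

def TIER_3_DOMAINS : List String :=
  ["prnewswire.com", "businesswire.com", "globenewswire.com", "accesswire.com",
   "seekingalpha.com", "fool.com", "investopedia.com"]

def SOCIAL_MEDIA_DOMAINS : List String :=
  ["twitter.com", "x.com", "facebook.com", "linkedin.com", "reddit.com",
   "instagram.com", "tiktok.com"]

-- each Python 'for d in L: if d in dl: return k' is 'if L.any (d in dl) then some k'
def assign_tier_by_domain_py (source_domain : String) : Option Int :=
  let domain_lower := PySem.Str.lower source_domain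
  if TIER_1_DOMAINS.any (fun t => PySem.Str.isIn t domain_lower) then some 1
  else if TIER_2_DOMAINS.any (fun t => PySem.Str.isIn t domain_lower) then some 2
  else if TIER_3_DOMAINS.any (fun t => PySem.Str.isIn t domain_lower) then some 3
  else if SOCIAL_MEDIA_DOMAINS.any (fun t => PySem.Str.isIn t domain_lower) then some 4
  else none

-- ===== PORT B =====
def TIERED : List (Int × List String) :=
  [(1, TIER_1_DOMAINS), (2, TIER_2_DOMAINS), (3, TIER_3_DOMAINS), (4, SOCIAL_MEDIA_DOMAINS)]

-- Source B: hits = [tier for tier, subs in _TIERED for sub in subs if sub in domain_lower];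
--       return min(hits) if hits else None
def assign_tier_by_domain_py_alt (source_domain : String) : Option Int :=
  let domain_lower := PySem.Str.lower source_domain
  let hits := TIERED.flatMap (fun g =>
    (g.2.filter (fun sub => PySem.Str.isIn sub domain_lower)).map (fun _ => g.1))
  if hits.isEmpty then none else PySem.List.min? hits (fun x => x)

-- ===== PRECONDITION & SPEC =====
def Spec_assign_tier_by_domain_py (source_domain : String) (out : Option Int) : Prop := out = assign_tier_by_domain_py_alt source_domain
instance (source_domain : String) (out : Option Int) : Decidable (Spec_assign_tier_by_domain_py source_domain out) := by unfold Spec_assign_tier_by_domain_py; infer_instance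

-- ===== CLAIM (what is proved, stated in full; the proofs are below) =====
def Claim_equal_assign_tier_by_domain_py : Prop := ∀ (source_domain : String), Dom_assign_tier_by_domain_py source_domain → Spec_assign_tier_by_domain_py source_domain (assign_tier_by_domain_py source_domain)

-- ===== LEMMAS AND PROOFS =====

theorem foldl_min_const (c : Int) (t : List Int) (h : ∀ y ∈ t, c ≤ y) :
    t.foldl min c = c := by
  induction t with
  | nil => rfl
  | cons a as ih =>
      have : min c a = c := min_eq_left (h a (List.mem_cons_self))
      simpa [List.foldl, this] using ih (fun y hy => h y (List.mem_cons_of_mem _ hy))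

-- min of a concatenation whose first part is nonempty with all elements = c
-- and whose second part is bounded below by c
theorem min_groups (c : Int) (xs rest : List Int)
    (hne : xs ≠ []) (hxs : ∀ y ∈ xs, y = c) (hrest : ∀ y ∈ rest, c ≤ y) :
    PySem.List.min? (xs ++ rest) (fun x => x) = some c := by
  cases xs with
  | nil => exact absurd rfl hne
  | cons a as =>
      have ha : a = c := hxs a List.mem_cons_self
      subst ha
      rw [List.cons_append, PySem.List.min?_id_cons]
      have : (as ++ rest).foldl min a = a := by
        apply foldl_min_const
        intro y hy
        rcases List.mem_append.mp hy with h | h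
        · exact le_of_eq (hxs y (List.mem_cons_of_mem _ h)).symm
        · exact hrest y h
      rw [this]

theorem map_ne_nil {α β : Type} (f : α → β) (xs : List α) (h : xs ≠ []) :
    xs.map f ≠ [] := by
  simpa [List.map_eq_nil_iff] using h

theorem ne_empty_append {α : Type} (xs rest : List α) (h : xs ≠ []) :
    ¬ ((xs ++ rest).isEmpty = true) := by
  simp only [List.isEmpty_iff, List.append_eq_nil_iff]
  tauto

theorem ne_empty {α : Type} (xs : List α) (h : xs ≠ []) :
    ¬ (xs.isEmpty = true) := by
  simpa [List.isEmpty_iff] using h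

theorem any_iff_filter_ne_nil {α : Type} (p : α → Bool) (xs : List α) :
    xs.any p = true ↔ xs.filter p ≠ [] := by
  simp [List.any_eq_true, List.filter_eq_nil_iff]

-- ===== VERDICT (by name: the statement is the Claim_ definition above) =====
theorem assign_tier_by_domain_py_spec : Claim_equal_assign_tier_by_domain_py := by
  intro s _
  show assign_tier_by_domain_py s = assign_tier_by_domain_py_alt s
  unfold assign_tier_by_domain_py assign_tier_by_domain_py_alt TIERED
  simp only [List.flatMap_cons, List.flatMap_nil, List.append_nil]
  set p := fun sub => PySem.Str.isIn sub (PySem.Str.lower s) with hp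
  set f1 := TIER_1_DOMAINS.filter p
  set f2 := TIER_2_DOMAINS.filter p
  set f3 := TIER_3_DOMAINS.filter p
  set f4 := SOCIAL_MEDIA_DOMAINS.filter p
  by_cases h1 : TIER_1_DOMAINS.any p
  · have hne : f1.map (fun _ => (1:Int)) ≠ [] :=
      map_ne_nil _ _ ((any_iff_filter_ne_nil p _).mp h1)
    have hmin := min_groups 1 (f1.map (fun _ => (1:Int)))
        (f2.map (fun _ => (2:Int)) ++ (f3.map (fun _ => (3:Int)) ++ f4.map (fun _ => (4:Int))))
        hne (by simp) (by intro y hy; simp at hy; omega)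
    rw [if_pos h1, if_neg (ne_empty_append _ _ hne), hmin]
  · have hf1 : f1 = [] := by
      by_contra h; exact h1 ((any_iff_filter_ne_nil p _).mpr h)
    rw [if_neg h1, hf1]
    simp only [List.map_nil, List.nil_append]
    by_cases h2 : TIER_2_DOMAINS.any p
    · have hne : f2.map (fun _ => (2:Int)) ≠ [] :=
        map_ne_nil _ _ ((any_iff_filter_ne_nil p _).mp h2)
      have hmin := min_groups 2 (f2.map (fun _ => (2:Int)))
          (f3.map (fun _ => (3:Int)) ++ f4.map (fun _ => (4:Int)))
          hne (by simp) (by intro y hy; simp at hy; omega)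
      rw [if_pos h2, if_neg (ne_empty_append _ _ hne), hmin]
    · have hf2 : f2 = [] := by
        by_contra h; exact h2 ((any_iff_filter_ne_nil p _).mpr h)
      rw [if_neg h2, hf2]
      simp only [List.map_nil, List.nil_append]
      by_cases h3 : TIER_3_DOMAINS.any p
      · have hne : f3.map (fun _ => (3:Int)) ≠ [] :=
          map_ne_nil _ _ ((any_iff_filter_ne_nil p _).mp h3)
        have hmin := min_groups 3 (f3.map (fun _ => (3:Int))) (f4.map (fun _ => (4:Int)))
            hne (by simp) (by intro y hy; simp at hy; omega)
        rw [if_pos h3, if_neg (ne_empty_append _ _ hne), hmin]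
      · have hf3 : f3 = [] := by
          by_contra h; exact h3 ((any_iff_filter_ne_nil p _).mpr h)
        rw [if_neg h3, hf3]
        simp only [List.map_nil, List.nil_append]
        by_cases h4 : SOCIAL_MEDIA_DOMAINS.any p
        · have hne : f4.map (fun _ => (4:Int)) ≠ [] :=
            map_ne_nil _ _ ((any_iff_filter_ne_nil p _).mp h4)
          have hmin := min_groups 4 (f4.map (fun _ => (4:Int))) [] hne (by simp) (by simp)
          rw [List.append_nil] at hmin
          rw [if_pos h4, if_neg (ne_empty _ hne), hmin]
        · have hf4 : f4 = [] := by
            by_contra h; exact h4 ((any_iff_filter_ne_nil p _).mpr h)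
          rw [if_neg h4, hf4]
          simp
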